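-- pv_equiv track=rewrite | github.com/estructuras-y-programacion-itba/practica-0-tloustau-dev | main.py | calcular_puntaje
-- ===== SOURCE A (Python) =====
-- def verificar_jugada(dados):
--     conteos = {}
--     for d in dados:
--         if d not in conteos:
--             conteos[d] = 0
--         conteos[d] += 1
--
--     valores = sorted(conteos.values(), reverse=True)
--     jugadas = []
--
--     if valores[0] == 5:
--         jugadas.append("G")
--     if valores[0] >= 4:
--         jugadas.append("P")
--     if valores[0] >= 3 and len(valores) >= 2 and valores[1] >= 2:
--         jugadas.append("F")
--
--     dados_unicos = sorted(set(dados))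
--     if len(dados_unicos) == 5 and dados_unicos[4] - dados_unicos[0] == 4:
--         jugadas.append("E")
--
--     return jugadas
--
-- def calcular_puntaje(categoria, dados, primera_tirada):
--     jugadas = verificar_jugada(dados)
--     bonus = 5 if primera_tirada else 0
--
--     if categoria == "G":
--         return 50 if "G" in jugadas else 0
--     if categoria == "P":
--         return (40 + bonus) if "P" in jugadas else 0
--     if categoria == "F":
--         return (30 + bonus) if "F" in jugadas else 0
--     if categoria == "E":
--         return (20 + bonus) if "E" in jugadas else 0
--
--     numero = int(categoria)
--     return sum(d for d in dados if d == numero)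
-- ===== SOURCE B (Python) =====
-- def calcular_puntaje(categoria, dados, primera_tirada):
--     if categoria in ("G", "P", "F", "E"):
--         bonus = 5 if primera_tirada else 0
--         cnt = {}
--         for d in dados:
--             cnt[d] = cnt.get(d, 0) + 1
--         m1 = m2 = 0
--         for c in cnt.values():
--             if m1 <= c:
--                 m1, m2 = c, m1
--             elif m2 < c:
--                 m2 = c
--         if categoria == "G":
--             return 50 if m1 == 5 else 0
--         if categoria == "P":
--             return 40 + bonus if m1 >= 4 else 0
--         if categoria == "F":
--             return 30 + bonus if m1 >= 3 and m2 >= 2 else 0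
--         return 20 + bonus if len(cnt) == 5 and max(cnt) - min(cnt) == 4 else 0
--     numero = int(categoria)
--     total = 0
--     for d in dados:
--         if d == numero:
--             total += d
--     return total
-- ===== Notes on version B (the rewrite author's own statement) =====
-- stated objective: simpler
-- what changed: B drops the verificar_jugada helper that builds the full list of achieved plays: it dispatches on categoria first and computes only what that category needs, replacing the descending sort of the counts by a single pass that keeps the two largest counts and the sorted-unique-values step by len/max/min of the count dict's keys.
import Mathlib
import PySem

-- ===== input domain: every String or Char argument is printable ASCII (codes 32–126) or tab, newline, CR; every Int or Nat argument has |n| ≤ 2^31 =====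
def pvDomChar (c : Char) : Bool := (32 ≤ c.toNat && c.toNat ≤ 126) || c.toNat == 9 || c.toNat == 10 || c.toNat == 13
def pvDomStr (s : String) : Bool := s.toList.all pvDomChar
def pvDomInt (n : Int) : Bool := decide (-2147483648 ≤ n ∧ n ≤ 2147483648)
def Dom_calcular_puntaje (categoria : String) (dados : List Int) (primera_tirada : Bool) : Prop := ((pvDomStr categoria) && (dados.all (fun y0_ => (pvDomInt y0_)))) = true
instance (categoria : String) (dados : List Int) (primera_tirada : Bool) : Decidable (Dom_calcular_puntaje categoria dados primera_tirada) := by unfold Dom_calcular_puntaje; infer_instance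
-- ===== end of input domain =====

-- B dispatches on the category first and computes only that category's predicate with a one-pass
-- top-two-counts loop (no jugadas list, no sorting); same return value as A wherever A returns.

-- ===== PORT A =====
-- literal transliteration of verificar_jugada
def verificar_jugada (dados : List Int) : List String :=
  let conteos : PySem.Dict Int Int :=
    dados.foldl (fun c d => (if c.contains d then c else c.insert d 0).modify d 0 (· + 1)) PySem.Dict.empty
  let valores := PySem.List.sorted conteos.values (fun v => v) true
  -- valores[0]: IndexError on empty dados — those inputs are excluded by Pre_; pyGetD is exact in range
  let v0 := PySem.List.pyGetD valores 0 0
  let jugadas : List String := if v0 = 5 then [] ++ ["G"] else []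
  let jugadas := if 4 ≤ v0 then jugadas ++ ["P"] else jugadas
  -- valores[1] is only read under '2 ≤ valores.length' (Python's short-circuit), so pyGetD is exact
  let jugadas := if 3 ≤ v0 ∧ 2 ≤ valores.length ∧ 2 ≤ PySem.List.pyGetD valores 1 0 then jugadas ++ ["F"] else jugadas
  let dados_unicos := PySem.List.sorted (PySem.Set.ofList dados) (fun v => v) false
  -- dados_unicos[4]/[0] only read under 'length = 5', so pyGetD is exact
  let jugadas := if dados_unicos.length = 5 ∧ PySem.List.pyGetD dados_unicos 4 0 - PySem.List.pyGetD dados_unicos 0 0 = 4 then jugadas ++ ["E"] else jugadas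
  jugadas

def calcular_puntaje (categoria : String) (dados : List Int) (primera_tirada : Bool) : Int :=
  let jugadas := verificar_jugada dados
  let bonus : Int := if primera_tirada then 5 else 0
  if categoria = "G" then (if "G" ∈ jugadas then 50 else 0)
  else if categoria = "P" then (if "P" ∈ jugadas then 40 + bonus else 0)
  else if categoria = "F" then (if "F" ∈ jugadas then 30 + bonus else 0)
  else if categoria = "E" then (if "E" ∈ jugadas then 20 + bonus else 0)
  else match PySem.Int.ofStr? categoria with
    | none => 0  -- int(categoria) raises ValueError — excluded by Pre_
    | some numero => (dados.filter (fun d => d == numero)).sum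

-- ===== PORT B =====
-- one pass over the counts keeping the two largest (B's 'for c in cnt.values()' loop)
def topTwoStep (p : Int × Int) (c : Int) : Int × Int :=
  if p.1 ≤ c then (c, p.1) else if p.2 < c then (p.1, c) else p

def calcular_puntaje_alt (categoria : String) (dados : List Int) (primera_tirada : Bool) : Int :=
  if categoria = "G" ∨ categoria = "P" ∨ categoria = "F" ∨ categoria = "E" then
    let bonus : Int := if primera_tirada then 5 else 0
    let cnt : PySem.Dict Int Int := dados.foldl (fun c d => c.insert d (c.getD d 0 + 1)) PySem.Dict.empty
    let m := cnt.values.foldl topTwoStep (0, 0)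
    if categoria = "G" then (if m.1 = 5 then 50 else 0)
    else if categoria = "P" then (if 4 ≤ m.1 then 40 + bonus else 0)
    else if categoria = "F" then (if 3 ≤ m.1 ∧ 2 ≤ m.2 then 30 + bonus else 0)
    else
      -- max(cnt)/min(cnt) are only read under 'len(cnt) == 5' (Python's short-circuit), so the .getD 0 default is unreachable
      if cnt.size = 5 ∧ (PySem.List.max? cnt.keys (fun v => v)).getD 0 - (PySem.List.min? cnt.keys (fun v => v)).getD 0 = 4 then 20 + bonus else 0
  else match PySem.Int.ofStr? categoria with
    | none => 0  -- int(categoria) raises ValueError — excluded by Pre_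
    | some numero => dados.foldl (fun acc d => if d = numero then acc + d else acc) 0

-- ===== PRECONDITION & SPEC =====
-- Pre_ excludes exactly the inputs where A raises: empty dados (IndexError on valores[0]) and a
-- categoria that is none of G/P/F/E and not int-parsable (ValueError).
def Pre_calcular_puntaje (categoria : String) (dados : List Int) (primera_tirada : Bool) : Prop :=
  dados ≠ [] ∧ (categoria = "G" ∨ categoria = "P" ∨ categoria = "F" ∨ categoria = "E" ∨ (PySem.Int.ofStr? categoria).isSome = true)
instance (categoria : String) (dados : List Int) (primera_tirada : Bool) : Decidable (Pre_calcular_puntaje categoria dados primera_tirada) := by unfold Pre_calcular_puntaje; infer_instance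
def pvWitness_calcular_puntaje : String × List Int × Bool := ("G", [3, 3, 3, 3, 3], true)

def Spec_calcular_puntaje (categoria : String) (dados : List Int) (primera_tirada : Bool) (out : Int) : Prop := out = calcular_puntaje_alt categoria dados primera_tirada
instance (categoria : String) (dados : List Int) (primera_tirada : Bool) (out : Int) : Decidable (Spec_calcular_puntaje categoria dados primera_tirada out) := by unfold Spec_calcular_puntaje; infer_instance

-- ===== CLAIM (what is proved, stated in full; the proofs are below) =====
def Claim_equal_calcular_puntaje : Prop := ∀ (categoria : String) (dados : List Int) (primera_tirada : Bool), Dom_calcular_puntaje categoria dados primera_tirada → Pre_calcular_puntaje categoria dados primera_tirada → Spec_calcular_puntaje categoria dados primera_tirada (calcular_puntaje categoria dados primera_tirada)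
-- ===== LEMMAS AND PROOFS =====

-- A's count loop is collections.Counter
lemma stepA_eq (d : PySem.Dict Int Int) (x : Int) :
    (if d.contains x then d else d.insert x 0).modify x 0 (· + 1) = d.modify x 0 (· + 1) := by
  by_cases h : d.contains x
  · simp [h]
  · simp only [h, Bool.false_eq_true, if_false, PySem.Dict.modify]
    rw [PySem.Dict.getD_insert_self, PySem.Dict.insert_insert_self,
      PySem.Dict.getD_of_not_contains _ _ (by simpa using h)]

lemma countsA_eq (dados : List Int) :
    dados.foldl (fun c d => (if c.contains d then c else c.insert d 0).modify d 0 (· + 1)) PySem.Dict.empty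
      = PySem.Dict.counter dados := by
  unfold PySem.Dict.counter
  exact PySem.List.foldl_congr_mem _ _ _ _ (fun acc x _ => stepA_eq acc x)

lemma ttAux (l : List Int) : ∀ m1 m2 : Int, m2 ≤ m1 → (∀ c ∈ l, c ≤ m2) →
    l.foldl topTwoStep (m1, m2) = (m1, m2) := by
  induction l with
  | nil => intro _ _ _ _; rfl
  | cons a t ih =>
    intro m1 m2 h21 hb
    have ha : a ≤ m2 := hb a (by simp)
    have hst : topTwoStep (m1, m2) a = (m1, m2) := by
      unfold topTwoStep
      split_ifs with h1 h2 <;> simp only [Prod.mk.injEq] <;> constructor <;> omega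
    simpa [List.foldl_cons, hst] using ih m1 m2 h21 (fun c hc => hb c (by simp [hc]))

lemma ttSorted (l : List Int) (hp : l.Pairwise (fun a b : Int => b ≤ a)) (hpos : ∀ x ∈ l, 0 < x) :
    l.foldl topTwoStep (0, 0) = (PySem.List.pyGetD l 0 0, PySem.List.pyGetD l 1 0) := by
  match l with
  | [] => rfl
  | [a] =>
    have : (0 : Int) ≤ a := le_of_lt (hpos a (by simp))
    simp [topTwoStep, PySem.List.pyGetD_of_nonneg, this]
  | a :: b :: t =>
    have hba : b ≤ a := (List.pairwise_cons.mp hp).1 b (by simp)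
    have hpb := List.pairwise_cons.mp (List.pairwise_cons.mp hp).2
    have h0a : (0 : Int) ≤ a := le_of_lt (hpos a (by simp))
    have h0b : (0 : Int) < b := hpos b (by simp)
    have hs1 : topTwoStep (0, 0) a = (a, 0) := by unfold topTwoStep; simp [h0a]
    have hs2 : topTwoStep (a, 0) b = (a, b) := by
      unfold topTwoStep
      split_ifs with h1 h2 <;> simp only [Prod.mk.injEq] <;> constructor <;> omega
    have := ttAux t a b hba hpb.1
    simp only [List.foldl_cons, hs1, hs2, this]
    simp [PySem.List.pyGetD_of_nonneg]

lemma ttStep_eq (a b c : Int) : topTwoStep (a, b) c = (max a c, if a ≤ c then a else max b c) := by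
  unfold topTwoStep
  dsimp only
  split_ifs <;> simp only [Prod.mk.injEq] <;> constructor <;> first | trivial | omega

lemma ttRcomm (s : Int × Int) (x y : Int) : topTwoStep (topTwoStep s x) y = topTwoStep (topTwoStep s y) x := by
  obtain ⟨a, b⟩ := s
  simp only [ttStep_eq, Prod.mk.injEq]
  split_ifs <;> constructor <;> omega

lemma ttPerm (l : List Int) : l.foldl topTwoStep (0, 0)
    = (PySem.List.sorted l (fun v => v) true).foldl topTwoStep (0, 0) :=
  List.Perm.foldl_eq' (PySem.List.sorted_perm l (fun v => v) true).symm
    (fun x _ y _ z => (ttRcomm z x y)) (0, 0)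

-- the counts of a non-empty hand: all positive, and not the empty list
lemma values_pos (dados : List Int) : ∀ v ∈ (PySem.Dict.counter dados).values, 0 < v := by
  intro v hv
  rw [PySem.Dict.values_eq_map_keys _ (PySem.Dict.nodup_keys_counter dados) 0] at hv
  obtain ⟨k, hk, rfl⟩ := List.mem_map.mp hv
  rw [PySem.Dict.getD_counter]
  have : k ∈ dados := (PySem.Set.mem_ofList dados k).mp (by rwa [PySem.Dict.keys_counter] at hk)
  exact_mod_cast List.count_pos_iff.mpr this

-- the one-pass loop computes the first two entries of the descending sort of the counts
lemma topTwo_eq (dados : List Int) :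
    (PySem.Dict.counter dados).values.foldl topTwoStep (0, 0)
      = (PySem.List.pyGetD (PySem.List.sorted (PySem.Dict.counter dados).values (fun v => v) true) 0 0,
         PySem.List.pyGetD (PySem.List.sorted (PySem.Dict.counter dados).values (fun v => v) true) 1 0) := by
  rw [ttPerm]
  exact ttSorted _ (PySem.List.sorted_pairwise_rev _ _)
    (fun x hx => values_pos dados x ((PySem.List.mem_sorted _ _ _ x).mp hx))

lemma v1_len (l : List Int) (h : 2 ≤ PySem.List.pyGetD l 1 0) : 2 ≤ l.length := by
  match l with
  | [] => simp [PySem.List.pyGetD_of_nonneg] at h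
  | [a] => simp [PySem.List.pyGetD_of_nonneg, List.getD] at h
  | a :: b :: t => simp

-- E: endpoints of the ascending sorted distinct values are max(cnt) and min(cnt)
lemma endpoints_eq (ks : List Int) (h5 : ks.length = 5) :
    PySem.List.pyGetD (PySem.List.sorted ks (fun v => v) false) 4 0
        - PySem.List.pyGetD (PySem.List.sorted ks (fun v => v) false) 0 0
      = (PySem.List.max? ks (fun v => v)).getD 0 - (PySem.List.min? ks (fun v => v)).getD 0 := by
  have hne : ks ≠ [] := by intro h; rw [h] at h5; simp at h5
  have hlen : (PySem.List.sorted ks (fun v => v) false).length = 5 := by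
    rw [PySem.List.length_sorted]; exact h5
  obtain ⟨mx, hmx⟩ : ∃ mx, PySem.List.max? ks (fun v => v) = some mx := by
    cases hm : PySem.List.max? ks (fun v => v) with
    | none => exact absurd ((PySem.List.max?_eq_none_iff ks _).mp hm) hne
    | some m => exact ⟨m, rfl⟩
  obtain ⟨mn, hmn⟩ : ∃ mn, PySem.List.min? ks (fun v => v) = some mn := by
    cases hm : PySem.List.min? ks (fun v => v) with
    | none =>
      rcases PySem.List.max?_mem hmx with _
      exact absurd ((PySem.List.min?_eq_none_iff ks _).mp hm) hne
    | some m => exact ⟨m, rfl⟩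
  have h4 : (4 : Int) < ((PySem.List.sorted ks (fun v => v) false).length : Int) := by rw [hlen]; norm_num
  have h0 : (0 : Int) < ((PySem.List.sorted ks (fun v => v) false).length : Int) := by rw [hlen]; norm_num
  rw [PySem.List.pyGetD_eq_getElem _ _ (by norm_num) h4, PySem.List.pyGetD_eq_getElem _ _ le_rfl h0,
    hmx, hmn]
  have hmem4 : (PySem.List.sorted ks (fun v => v) false)[(4 : Int).toNat] ∈ ks :=
    (PySem.List.mem_sorted _ _ _ _).mp (List.getElem_mem _)
  have hmem0 : (PySem.List.sorted ks (fun v => v) false)[(0 : Int).toNat] ∈ ks :=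
    (PySem.List.mem_sorted _ _ _ _).mp (List.getElem_mem _)
  have hx4 : (PySem.List.sorted ks (fun v => v) false)[(4 : Int).toNat] = mx := by
    apply le_antisymm (PySem.List.max?_isMax hmx _ hmem4)
    obtain ⟨i, hi, hie⟩ := List.mem_iff_getElem.mp ((PySem.List.mem_sorted ks (fun v => v) false mx).mpr (PySem.List.max?_mem hmx))
    rw [← hie]
    exact PySem.List.sorted_id_getElem_mono ks (by omega : i ≤ (4 : Int).toNat) (by omega)
  have hx0 : (PySem.List.sorted ks (fun v => v) false)[(0 : Int).toNat] = mn := by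
    apply le_antisymm
    · obtain ⟨i, hi, hie⟩ := List.mem_iff_getElem.mp ((PySem.List.mem_sorted ks (fun v => v) false mn).mpr (PySem.List.min?_mem hmn))
      rw [← hie]
      exact PySem.List.sorted_id_getElem_mono ks (by omega : (0 : Int).toNat ≤ i) hi
    · exact PySem.List.min?_isMin hmn _ hmem0
  rw [hx4, hx0]
  rfl

-- numeric branch: the accumulator loop is the filtered sum
lemma sum_branch (dados : List Int) (n : Int) :
    dados.foldl (fun acc d => if d = n then acc + d else acc) 0 = (dados.filter (fun d => d == n)).sum := by
  rw [PySem.List.foldl_ite_eq_foldl_filter (fun d => d = n) (fun acc d => acc + d) dados 0]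
  rw [List.sum_eq_foldl,
    List.filter_congr (l := dados) (fun x _ => by by_cases h : x = n <;> simp [h] : ∀ x ∈ dados, (fun d => d == n) x = (fun x => decide (x = n)) x)]

lemma size_counter (dados : List Int) : (PySem.Dict.counter dados).size = (PySem.Set.ofList dados).length := by
  rw [← PySem.Dict.keys_counter dados]
  simp [PySem.Dict.size, PySem.Dict.keys]

-- ===== VERDICT (by name: the statement is the Claim_ definition above) =====
set_option maxHeartbeats 1000000 in
theorem calcular_puntaje_spec : Claim_equal_calcular_puntaje := by
  intro categoria dados primera_tirada _ hpre
  obtain ⟨hne, hcat⟩ := hpre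
  simp only [Spec_calcular_puntaje, calcular_puntaje, calcular_puntaje_alt, verificar_jugada]
  simp only [countsA_eq, PySem.Dict.foldl_insert_getD_add_one_eq_counter, topTwo_eq,
    size_counter, PySem.Dict.keys_counter]
  by_cases hG : categoria = "G"
  · subst hG
    simp only [String.reduceEq, reduceIte, true_or, or_true, false_or, or_false]
    split_ifs <;> simp_all
  by_cases hP : categoria = "P"
  · subst hP
    simp only [String.reduceEq, reduceIte, true_or, or_true, false_or, or_false]
    split_ifs <;> simp_all
  by_cases hF : categoria = "F"
  · subst hF
    simp only [String.reduceEq, reduceIte, true_or, or_true, false_or, or_false]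
    have hl := v1_len (PySem.List.sorted (PySem.Dict.counter dados).values (fun v => v) true)
    split_ifs <;> simp_all <;> omega
  by_cases hE : categoria = "E"
  · subst hE
    simp only [String.reduceEq, reduceIte, true_or, or_true, false_or, or_false]
    by_cases h5 : (PySem.Set.ofList dados).length = 5
    · have hlen : (PySem.List.sorted (PySem.Set.ofList dados) (fun v => v) false).length = 5 := by
        rw [PySem.List.length_sorted]; exact h5
      simp only [endpoints_eq _ h5]
      split_ifs <;> simp_all
    · have hlen : (PySem.List.sorted (PySem.Set.ofList dados) (fun v => v) false).length ≠ 5 := by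
        rw [PySem.List.length_sorted]; exact h5
      split_ifs <;> simp_all
  · simp only [hG, hP, hF, hE, if_neg, false_or, if_false]
    rcases hcat with h | h | h | h | h
    · exact absurd h hG
    · exact absurd h hP
    · exact absurd h hF
    · exact absurd h hE
    · obtain ⟨n, hn⟩ := Option.isSome_iff_exists.mp h
      rw [hn]
      exact (sum_branch dados n).symm
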